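-- pv_equiv track=rewrite | github.com/MinhThuan2406/LesterDownloader | services/platform_handler.py | _determine_content_type
-- ===== SOURCE A (Python) =====
-- from typing import Dict, Any, Optional, Tuple, List
--
-- def _determine_content_type(platform: str, title: str, description: str, duration: Optional[int], formats: list) -> str:
--     """Determine content type based on platform and metadata"""
--
--     if platform == 'instagram':
--         if any(keyword in title for keyword in ['story', 'stories']):
--             return 'story'
--         elif any(keyword in title for keyword in ['reel', 'reels']):
--             return 'reel'
--         elif any(keyword in title for keyword in ['carousel', 'gallery', 'multiple']):
--             return 'gallery'
--         elif duration and duration > 0: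
--             return 'video'
--         else:
--             return 'image'
--
--     elif platform == 'facebook':
--         if any(keyword in title for keyword in ['album', 'gallery', 'photos']):
--             return 'gallery'
--         elif any(keyword in title for keyword in ['reel', 'reels']):
--             return 'reel'
--         elif duration and duration > 0:
--             return 'video'
--         else:
--             return 'image'
--
--     elif platform == 'twitter':
--         if duration and duration > 0:
--             return 'video'
--         else:
--             return 'image'
--
--     elif platform == 'tiktok':
--         return 'video'  # TikTok is primarily video
--
--     elif platform == 'youtube':
--         if duration and duration > 0:
--             return 'video'
--         else:
--             return 'unknown'
--
--     elif platform == 'reddit':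
--         if duration and duration > 0:
--             return 'video'
--         elif any(keyword in title for keyword in ['gallery', 'album']):
--             return 'gallery'
--         else:
--             return 'image'
--
--     else:
--         # Generic detection
--         if duration and duration > 0:
--             return 'video'
--         else:
--             return 'image'
-- ===== SOURCE B (Python) =====
-- from typing import Optional
--
-- # Table-driven classifier: each platform maps to an ordered rule list
-- # (keyword-list rule, duration rule 'DUR', or unconditional default None).
-- _RULES = {
--     'instagram': [(['story', 'stories'], 'story'),
--                   (['reel', 'reels'], 'reel'),
--                   (['carousel', 'gallery', 'multiple'], 'gallery'),
--                   ('DUR', 'video'),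
--                   (None, 'image')],
--     'facebook': [(['album', 'gallery', 'photos'], 'gallery'),
--                  (['reel', 'reels'], 'reel'),
--                  ('DUR', 'video'),
--                  (None, 'image')],
--     'twitter': [('DUR', 'video'), (None, 'image')],
--     'tiktok': [(None, 'video')],
--     'youtube': [('DUR', 'video'), (None, 'unknown')],
--     'reddit': [('DUR', 'video'),
--                (['gallery', 'album'], 'gallery'),
--                (None, 'image')],
-- }
-- _GENERIC = [('DUR', 'video'), (None, 'image')]
--
--
-- def _determine_content_type(platform: str, title: str, description: str, duration: Optional[int], formats: list) -> str:
--     for cond, result in _RULES.get(platform, _GENERIC):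
--         if cond is None:
--             return result
--         if cond == 'DUR':
--             if duration and duration > 0:
--                 return result
--         elif any(k in title for k in cond):
--             return result
-- ===== Notes on version B (the rewrite author's own statement) =====
-- stated objective: simpler
-- what changed: Replaced A's nested if/elif cascade by a data-driven rule table: a dict from platform to an ordered list of (condition, result) rules, evaluated by one generic first-match loop.
import Mathlib
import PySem

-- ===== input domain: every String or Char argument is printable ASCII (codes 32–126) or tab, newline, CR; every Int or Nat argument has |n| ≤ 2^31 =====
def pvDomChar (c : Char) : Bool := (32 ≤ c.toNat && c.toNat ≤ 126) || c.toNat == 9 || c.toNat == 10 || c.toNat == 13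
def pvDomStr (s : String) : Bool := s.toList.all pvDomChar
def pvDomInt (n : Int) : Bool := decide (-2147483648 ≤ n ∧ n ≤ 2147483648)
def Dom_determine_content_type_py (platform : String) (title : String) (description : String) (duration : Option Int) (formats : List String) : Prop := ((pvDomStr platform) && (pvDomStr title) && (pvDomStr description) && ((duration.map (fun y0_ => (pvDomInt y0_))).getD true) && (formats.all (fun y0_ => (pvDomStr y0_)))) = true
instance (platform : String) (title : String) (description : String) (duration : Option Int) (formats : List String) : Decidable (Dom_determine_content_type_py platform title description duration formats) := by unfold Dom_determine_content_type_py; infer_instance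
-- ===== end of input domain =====

-- B is a table-driven re-implementation (per-platform ordered rule lists) of A's if/elif cascade; objective: simpler/alternative structure, same values.

-- ===== PORT A =====
-- truthiness of `duration and duration > 0`
def pyDurTruthy (duration : Option Int) : Bool :=
  match duration with
  | none => false
  | some d => if d = 0 then false else decide (0 < d)

def determine_content_type_py (platform : String) (title : String) (description : String) (duration : Option Int) (formats : List String) : String :=
  if platform = "instagram" then
    if (["story", "stories"].any (fun k => PySem.Str.isIn k title)) then "story"
    else if (["reel", "reels"].any (fun k => PySem.Str.isIn k title)) then "reel"
    else if (["carousel", "gallery", "multiple"].any (fun k => PySem.Str.isIn k title)) then "gallery"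
    else if pyDurTruthy duration then "video"
    else "image"
  else if platform = "facebook" then
    if (["album", "gallery", "photos"].any (fun k => PySem.Str.isIn k title)) then "gallery"
    else if (["reel", "reels"].any (fun k => PySem.Str.isIn k title)) then "reel"
    else if pyDurTruthy duration then "video"
    else "image"
  else if platform = "twitter" then
    if pyDurTruthy duration then "video" else "image"
  else if platform = "tiktok" then "video"
  else if platform = "youtube" then
    if pyDurTruthy duration then "video" else "unknown"
  else if platform = "reddit" then
    if pyDurTruthy duration then "video"
    else if (["gallery", "album"].any (fun k => PySem.Str.isIn k title)) then "gallery"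
    else "image"
  else
    if pyDurTruthy duration then "video" else "image"

-- ===== PORT B =====
-- a rule condition: an unconditional default, a duration test, or a keyword list
inductive PvCond where
  | always : PvCond
  | dur : PvCond
  | kw : List String → PvCond

-- the rule table, as in Source B (_RULES as an association list)
def pvRules : PySem.Dict String (List (PvCond × String)) :=
  PySem.Dict.mk
  [("instagram", [(PvCond.kw ["story", "stories"], "story"),
                  (PvCond.kw ["reel", "reels"], "reel"),
                  (PvCond.kw ["carousel", "gallery", "multiple"], "gallery"),
                  (PvCond.dur, "video"),
                  (PvCond.always, "image")]),
   ("facebook", [(PvCond.kw ["album", "gallery", "photos"], "gallery"),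
                 (PvCond.kw ["reel", "reels"], "reel"),
                 (PvCond.dur, "video"),
                 (PvCond.always, "image")]),
   ("twitter", [(PvCond.dur, "video"), (PvCond.always, "image")]),
   ("tiktok", [(PvCond.always, "video")]),
   ("youtube", [(PvCond.dur, "video"), (PvCond.always, "unknown")]),
   ("reddit", [(PvCond.dur, "video"),
               (PvCond.kw ["gallery", "album"], "gallery"),
               (PvCond.always, "image")])]

def pvGeneric : List (PvCond × String) :=
  [(PvCond.dur, "video"), (PvCond.always, "image")]

-- the for-loop of Source B: return the result of the first matching rule ("" if none fires; every list ends with a default)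
def pvFirstMatch (rules : List (PvCond × String)) (title : String) (duration : Option Int) : String :=
  match rules with
  | [] => ""
  | (c, r) :: rest =>
    match c with
    | PvCond.always => r
    | PvCond.dur =>
      if (match duration with | none => false | some d => if d = 0 then false else decide (0 < d)) then r
      else pvFirstMatch rest title duration
    | PvCond.kw ks =>
      if ks.any (fun k => PySem.Str.isIn k title) then r
      else pvFirstMatch rest title duration

def determine_content_type_py_alt (platform : String) (title : String) (description : String) (duration : Option Int) (formats : List String) : String :=
  pvFirstMatch ((PySem.Dict.get? pvRules platform).getD pvGeneric) title duration

-- ===== PRECONDITION & SPEC =====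
def Spec_determine_content_type_py (platform : String) (title : String) (description : String) (duration : Option Int) (formats : List String) (out : String) : Prop := out = determine_content_type_py_alt platform title description duration formats
instance (platform : String) (title : String) (description : String) (duration : Option Int) (formats : List String) (out : String) : Decidable (Spec_determine_content_type_py platform title description duration formats out) := by unfold Spec_determine_content_type_py; infer_instance

-- ===== CLAIM (what is proved, stated in full; the proofs are below) =====
def Claim_equal_determine_content_type_py : Prop := ∀ (platform : String) (title : String) (description : String) (duration : Option Int) (formats : List String), Dom_determine_content_type_py platform title description duration formats → Spec_determine_content_type_py platform title description duration formats (determine_content_type_py platform title description duration formats)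

-- ===== LEMMAS AND PROOFS =====

-- ===== VERDICT (by name: the statement is the Claim_ definition above) =====
theorem determine_content_type_py_spec : Claim_equal_determine_content_type_py := by
  intro platform title description duration formats _
  unfold Spec_determine_content_type_py determine_content_type_py determine_content_type_py_alt
  by_cases h1 : platform = "instagram"
  · subst h1; simp [pvRules, PySem.Dict.get?, pvFirstMatch, pyDurTruthy]
  · by_cases h2 : platform = "facebook"
    · subst h2; simp [pvRules, PySem.Dict.get?, pvFirstMatch, pyDurTruthy]
    · by_cases h3 : platform = "twitter"
      · subst h3; simp [pvRules, PySem.Dict.get?, pvFirstMatch, pyDurTruthy]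
      · by_cases h4 : platform = "tiktok"
        · subst h4; simp [pvRules, PySem.Dict.get?, pvFirstMatch]
        · by_cases h5 : platform = "youtube"
          · subst h5; simp [pvRules, PySem.Dict.get?, pvFirstMatch, pyDurTruthy]
          · by_cases h6 : platform = "reddit"
            · subst h6; simp [pvRules, PySem.Dict.get?, pvFirstMatch, pyDurTruthy]
            · have g1 : ("instagram" == platform) = false := by simp; exact fun h => h1 h.symm
              have g2 : ("facebook" == platform) = false := by simp; exact fun h => h2 h.symm
              have g3 : ("twitter" == platform) = false := by simp; exact fun h => h3 h.symm
              have g4 : ("tiktok" == platform) = false := by simp; exact fun h => h4 h.symm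
              have g5 : ("youtube" == platform) = false := by simp; exact fun h => h5 h.symm
              have g6 : ("reddit" == platform) = false := by simp; exact fun h => h6 h.symm
              simp [h1, h2, h3, h4, h5, h6, pvRules, PySem.Dict.get?, List.find?, g1, g2, g3, g4, g5, g6, pvGeneric, pvFirstMatch, pyDurTruthy]
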